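-- pv_equiv track=rewrite | github.com/sukram-n/personal-accompanist | personal_accompanist/lilypond.py | add_triplets
-- ===== SOURCE A (Python) =====
-- def add_triplets(v_text):
--
--     triplet_is_open = False
--     for i in range(len(v_text) - 1):
--         if i % 3 == 0 and not triplet_is_open:
--             v_text[i] = "\n\\tuplet 3/2 {" + v_text[i]
--             triplet_is_open = True
--         if i % 3 == 2 and triplet_is_open:
--             v_text[i] += "}"
--             triplet_is_open = False
--     if triplet_is_open:
--         v_text[-1] += "}"
--     return v_text
-- ===== SOURCE B (Python) =====
-- def add_triplets(v_text):
--     # rebuild by chunks of three instead of A's per-index flag state machine: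
--     # a chunk with at least two elements gets wrapped, a lone trailing element is
--     # left alone; mutates v_text in place (slice assignment) and returns it, like A
--     out = []
--     for j in range(0, len(v_text), 3):
--         chunk = v_text[j:j + 3]
--         if len(chunk) >= 2:
--             chunk[0] = "\n\\tuplet 3/2 {" + chunk[0]
--             chunk[-1] += "}"
--         out.extend(chunk)
--     v_text[:] = out
--     return v_text
-- ===== Notes on version B (the rewrite author's own statement) =====
-- stated objective: simpler
-- what changed: Replaces A's per-index loop with a triplet_is_open flag and modulo bookkeeping by a direct pass over chunk starts j in range(0, len, 3): wrap a chunk of size >= 2, leave a lone trailing element, rebuild the output and slice-assign it back.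
import Mathlib
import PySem

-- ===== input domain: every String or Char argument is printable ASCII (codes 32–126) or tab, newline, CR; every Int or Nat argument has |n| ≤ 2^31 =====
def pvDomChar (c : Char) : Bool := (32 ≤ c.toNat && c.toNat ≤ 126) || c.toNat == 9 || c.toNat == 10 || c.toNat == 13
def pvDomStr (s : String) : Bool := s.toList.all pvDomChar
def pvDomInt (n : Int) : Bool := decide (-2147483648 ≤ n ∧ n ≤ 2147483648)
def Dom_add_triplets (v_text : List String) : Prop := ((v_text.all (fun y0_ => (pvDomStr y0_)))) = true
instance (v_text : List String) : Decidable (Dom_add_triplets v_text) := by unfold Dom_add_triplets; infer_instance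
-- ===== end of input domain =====

-- B rebuilds the list by structural recursion over chunks of three instead of A's
-- flag-and-modulo state machine (objective: simpler); both mutate v_text in place in
-- Python, the equivalence proved here is about the return value.


-- ===== PORT A =====
-- one iteration of A's for-loop body, state = (list, triplet_is_open)
def add_triplets_step (st : List String × Bool) (i : Int) : List String × Bool :=
  let st1 :=
    if PySem.Int.mod i 3 == 0 && !st.2 then
      (PySem.List.pySetD st.1 i ("\n\\tuplet 3/2 {" ++ PySem.List.pyGetD st.1 i ""), true)
    else st
  if PySem.Int.mod i 3 == 2 && st1.2 then
    (PySem.List.pySetD st1.1 i (PySem.List.pyGetD st1.1 i "" ++ "}"), false)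
  else st1

def add_triplets (v_text : List String) : List String :=
  let r := (PySem.List.pyRange 0 ((v_text.length : Int) - 1) 1).foldl add_triplets_step (v_text, false)
  if r.2 then PySem.List.pySetD r.1 (-1) (PySem.List.pyGetD r.1 (-1) "" ++ "}")
  else r.1

-- ===== PORT B =====
-- Source B's loop body: wrap one chunk v_text[j:j+3]
def chunkB (chunk : List String) : List String :=
  if chunk.length ≥ 2 then
    let c1 := PySem.List.pySetD chunk 0 ("\n\\tuplet 3/2 {" ++ PySem.List.pyGetD chunk 0 "")
    PySem.List.pySetD c1 (-1) (PySem.List.pyGetD c1 (-1) "" ++ "}")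
  else chunk

-- Source B builds 'out' by extending it with each wrapped chunk; v_text[:] = out; return v_text
def add_triplets_alt (v_text : List String) : List String :=
  (PySem.List.pyRange 0 (v_text.length : Int) 3).foldl
    (fun out j => out ++ chunkB (PySem.List.slice v_text (some j) (some (j + 3)))) []

-- ===== PRECONDITION & SPEC =====
def Spec_add_triplets (v_text : List String) (out : List String) : Prop := out = add_triplets_alt v_text
instance (v_text : List String) (out : List String) : Decidable (Spec_add_triplets v_text out) := by unfold Spec_add_triplets; infer_instance

-- ===== CLAIM (what is proved, stated in full; the proofs are below) =====
def Claim_equal_add_triplets : Prop := ∀ (v_text : List String), Dom_add_triplets v_text → Spec_add_triplets v_text (add_triplets v_text)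

-- ===== LEMMAS AND PROOFS =====

-- the action both programs apply to an interior element at index i
def gF (i : Nat) (x : String) : String :=
  if i % 3 = 0 then "\n\\tuplet 3/2 {" ++ x
  else if i % 3 = 2 then x ++ "}"
  else x

-- the common per-index description of both programs' output:
-- in a list of length n, element i becomes specF n i (element i)
def specF (n i : Nat) (x : String) : String :=
  if i + 1 < n ∧ i % 3 = 0 then "\n\\tuplet 3/2 {" ++ x
  else if i % 3 = 2 ∨ (i + 1 = n ∧ i % 3 = 1) then x ++ "}"
  else x

-- range(a, b, 3) peels its first element
lemma pyRange3_cons (a b : Int) (h : a < b) :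
    PySem.List.pyRange a b 3 = a :: PySem.List.pyRange (a + 3) b 3 := by
  rw [PySem.List.pyRange_of_pos _ _ (by norm_num : (0:Int) < 3),
      PySem.List.pyRange_of_pos _ _ (by norm_num : (0:Int) < 3)]
  rw [if_pos h]
  by_cases h2 : a + 3 < b
  · rw [if_pos h2]
    have hc : ((b - a + 3 - 1) / 3).toNat = ((b - (a + 3) + 3 - 1) / 3).toNat + 1 := by omega
    rw [hc, List.range_succ_eq_map]
    simp only [List.map_cons, List.map_map, Nat.cast_zero, mul_zero, add_zero]
    congr 1
    apply List.map_congr_left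
    intro k _
    simp [Nat.succ_eq_add_one]
    ring
  · rw [if_neg h2]
    have hc : ((b - a + 3 - 1) / 3).toNat = 1 := by omega
    rw [hc]
    simp

-- the chunk lemma: on the chunk starting at k, chunkB produces the per-index description

-- on the chunk starting at k, chunkB produces the per-index description
lemma chunkB_eq (v : List String) (k : Nat) (hk3 : k % 3 = 0) (hkl : k < v.length) :
    chunkB ((v.drop k).take 3)
      = ((v.drop k).take 3).mapIdx (fun i x => specF v.length (k + i) x) := by
  have hlen : (v.drop k).length = v.length - k := by simp
  rcases ht : v.drop k with _ | ⟨a, _ | ⟨b, _ | ⟨c, t⟩⟩⟩ <;>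
    rw [ht] at hlen <;> simp only [List.length_nil, List.length_cons] at hlen
  · omega
  · have hn : v.length = k + 1 := by omega
    simp [chunkB, specF, hn]
    intro h
    exfalso; omega
  · have hn : v.length = k + 2 := by omega
    simp only [List.take_succ_cons, chunkB]
    norm_num [PySem.List.pySetD, PySem.List.pySet?, PySem.List.pyIdx?, PySem.List.pyGetD, PySem.List.pyGet?]
    simp only [specF]
    exact ⟨by split_ifs <;> first | rfl | omega, by split_ifs <;> first | rfl | omega⟩
  · have hn : k + 3 ≤ v.length := by omega
    simp only [List.take_succ_cons, chunkB]
    norm_num [PySem.List.pySetD, PySem.List.pySet?, PySem.List.pyIdx?, PySem.List.pyGetD, PySem.List.pyGet?]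
    simp only [specF]
    exact ⟨by split_ifs <;> first | rfl | omega, by split_ifs <;> first | rfl | omega,
      by split_ifs <;> first | rfl | omega⟩

-- B's loop invariant: from chunk start k on, B appends the per-index description of the tail
lemma loopB (v : List String) (m k : Nat) (acc : List String) (hk3 : k % 3 = 0)
    (hm : v.length - k = m) (hk : k ≤ v.length) :
    (PySem.List.pyRange (k : Int) (v.length : Int) 3).foldl
      (fun out j => out ++ chunkB (PySem.List.slice v (some j) (some (j + 3)))) acc
    = acc ++ (v.drop k).mapIdx (fun i x => specF v.length (k + i) x) := by
  induction m using Nat.strong_induction_on generalizing k acc with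
  | _ m ih =>
    by_cases hkv : k < v.length
    · rw [pyRange3_cons _ _ (by exact_mod_cast hkv)]
      simp only [List.foldl_cons]
      rw [show ((k : Int) + 3) = (k : Int) + ((3 : Nat) : Int) by norm_num,
        PySem.List.slice_natCast_add, chunkB_eq v k hk3 hkv]
      by_cases hk3v : k + 3 ≤ v.length
      · rw [show ((k : Int) + ((3:Nat) : Int)) = ((k + 3 : Nat) : Int) by push_cast; ring]
        rw [ih (v.length - (k + 3)) (by omega) (k + 3) _ (by omega) rfl (by omega)]
        rw [List.append_assoc]
        congr 1
        have hdd : (v.drop k).drop 3 = v.drop (k + 3) := by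
          rw [List.drop_drop, Nat.add_comm]
        have hsplit : v.drop k = (v.drop k).take 3 ++ v.drop (k + 3) := by
          rw [← hdd, List.take_append_drop]
        conv_rhs => rw [hsplit]
        rw [List.mapIdx_append]
        congr 1
        · apply List.mapIdx_eq_mapIdx_iff.mpr
          intro i hi
          have hlt : (v.drop k).length = v.length - k := by simp
          have h3 : ((v.drop k).take 3).length = 3 := by
            simp [hlt]; omega
          rw [h3, show k + 3 + i = k + (i + 3) by ring]
      · have hn : v.length = k + 1 ∨ v.length = k + 2 := by omega
        have hnil : PySem.List.pyRange ((k : Int) + ((3:Nat) : Int)) (v.length : Int) 3 = [] := by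
          rw [PySem.List.pyRange_of_pos _ _ (by norm_num : (0:Int) < 3),
            if_neg (by push_cast; omega)]
          simp
        rw [hnil]
        simp only [List.foldl_nil]
        rw [show (v.drop k).take 3 = v.drop k from List.take_of_length_le (by simp; omega)]
    · have hkv' : k = v.length := by omega
      have hnil : PySem.List.pyRange (k : Int) (v.length : Int) 3 = [] := by
        rw [PySem.List.pyRange_of_pos _ _ (by norm_num : (0:Int) < 3),
          if_neg (by omega)]
        simp
      rw [hnil]
      simp [hkv', List.drop_length]

-- B equals the per-index description
lemma add_triplets_alt_eq_mapIdx (v : List String) :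
    add_triplets_alt v = v.mapIdx (fun i x => specF v.length i x) := by
  unfold add_triplets_alt
  rw [show (0 : Int) = ((0 : Nat) : Int) by norm_num,
    loopB v v.length 0 [] (by omega) (by omega) (by omega)]
  simp

-- lst[-1] = v on a nonempty list sets the last element (no PySem lemma covers pySetD at -1)
lemma pySetD_neg_one {α : Type} (xs : List α) (h : xs ≠ []) (v : α) :
    PySem.List.pySetD xs (-1) v = xs.set (xs.length - 1) v := by
  have hl : 1 ≤ xs.length := List.length_pos_of_ne_nil h
  simp only [PySem.List.pySetD, PySem.List.pySet?, PySem.List.pyIdx?]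
  rw [if_neg (by omega), if_pos (by omega : -(xs.length:Int) ≤ -1)]
  simp

-- invariant of A's loop: after the indices 0..k-1, every processed element carries gF
-- and triplet_is_open is exactly (k % 3 ≠ 0)
lemma loopA (v : List String) (k : Nat) (hk : k ≤ v.length) :
    (PySem.List.pyRange 0 (k : Int) 1).foldl add_triplets_step (v, false)
      = (v.mapIdx (fun i x => if i < k then gF i x else x), decide (k % 3 ≠ 0)) := by
  induction k with
  | zero =>
    rw [PySem.List.pyRange_one_eq_nil (by omega)]
    simp only [List.foldl_nil]
    rw [show (List.mapIdx (fun i x => if i < 0 then gF i x else x) v) = List.mapIdx (fun _ x => x) v by simp]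
    rw [List.mapIdx_eq_zipIdx_map]; simp
  | succ k ih =>
    have hk' : k ≤ v.length := by omega
    have hkl : k < v.length := by omega
    push_cast
    rw [PySem.List.pyRange_one_succ_right (by omega), List.foldl_append, ih hk']
    set L := v.mapIdx (fun i x => if i < k then gF i x else x) with hL
    have hLlen : L.length = v.length := by simp [hL]
    have hLk : L[k]'(by omega) = v[k]'(by omega) := by
      simp [hL, List.getElem_mapIdx]
    simp only [List.foldl_cons, List.foldl_nil]
    have hmod : PySem.Int.mod (k:Int) 3 = ((k % 3 : Nat) : Int) := PySem.Int.mod_natCast k 3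
    have h33 : k % 3 = 0 ∨ k % 3 = 1 ∨ k % 3 = 2 := by omega
    rcases h33 with h3 | h3 | h3
    · -- k % 3 = 0 : the triplet opens at k
      simp only [add_triplets_step, hmod, h3]
      norm_num
      constructor
      · have hget : L[k]?.getD "" = v[k]'hkl := by
          rw [List.getElem?_eq_getElem (by omega), Option.getD_some, hLk]
        rw [hget]
        apply List.ext_getElem (by simp [hL])
        intro j hj hj2
        simp only [List.getElem_set, hL, List.getElem_mapIdx]
        by_cases hjk : k = j
        · subst hjk
          simp [gF, h3]
        · rw [if_neg hjk]
          split_ifs <;> first | rfl | omega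
      · omega
    · -- k % 3 = 1 : nothing happens at k
      simp only [add_triplets_step, hmod, h3]
      norm_num
      constructor
      · apply List.ext_getElem (by simp [hL])
        intro j hj hj2
        simp only [hL, List.getElem_mapIdx]
        by_cases hjk : j = k
        · subst hjk
          rw [if_neg (by omega), if_pos (by omega), gF]
          rw [if_neg (by omega), if_neg (by omega)]
        · split_ifs <;> first | rfl | omega
      · omega
    · -- k % 3 = 2 : the triplet closes at k
      simp only [add_triplets_step, hmod, h3]
      norm_num
      constructor
      · have hget : L[k]?.getD "" = v[k]'hkl := by
          rw [List.getElem?_eq_getElem (by omega), Option.getD_some, hLk]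
        rw [hget]
        apply List.ext_getElem (by simp [hL])
        intro j hj hj2
        simp only [List.getElem_set, hL, List.getElem_mapIdx]
        by_cases hjk : k = j
        · subst hjk
          simp [gF, h3]
        · rw [if_neg hjk]
          split_ifs <;> first | rfl | omega
      · omega

-- A equals the per-index description
lemma add_triplets_eq_mapIdx (v : List String) :
    add_triplets v = v.mapIdx (fun i x => specF v.length i x) := by
  by_cases hv : v = []
  · subst hv; rfl
  · have hn : 1 ≤ v.length := List.length_pos_of_ne_nil hv
    unfold add_triplets
    have hcast : ((v.length : Int) - 1) = ((v.length - 1 : Nat) : Int) := by omega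
    rw [hcast, loopA v (v.length - 1) (by omega)]
    set L := v.mapIdx (fun i x => if i < v.length - 1 then gF i x else x) with hL
    have hLlen : L.length = v.length := by simp [hL]
    have hLne : L ≠ [] := by
      intro h; rw [h] at hLlen; simp at hLlen; omega
    by_cases hf : (v.length - 1) % 3 = 0
    · rw [if_neg (by simp [hf])]
      apply List.ext_getElem (by simp [hL])
      intro j hj hj2
      have hjv : j < v.length := by simpa using hj2
      simp only [hL, List.getElem_mapIdx, specF, gF]
      split_ifs <;> first | rfl | omega
    · rw [if_pos (by simp [hf])]
      simp only
      rw [PySem.List.pyGetD_neg_one L "" hLne, pySetD_neg_one L hLne]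
      rw [List.getLast_eq_getElem]
      apply List.ext_getElem (by simp [hL])
      intro j hj hj2
      have hjv : j < v.length := by simpa using hj2
      rw [List.getElem_set]
      simp only [hLlen]
      by_cases hjl : j = v.length - 1
      · rw [if_pos (by omega)]
        subst hjl
        simp only [hL, List.getElem_mapIdx, specF, gF]
        split_ifs <;> first | rfl | omega
      · rw [if_neg (by omega)]
        simp only [hL, List.getElem_mapIdx, specF, gF]
        split_ifs <;> first | rfl | omega

-- ===== VERDICT (by name: the statement is the Claim_ definition above) =====
theorem add_triplets_spec : Claim_equal_add_triplets := by
  intro v _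
  unfold Spec_add_triplets
  rw [add_triplets_eq_mapIdx, add_triplets_alt_eq_mapIdx]
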